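-- pv_equiv track=rewrite | github.com/danielrincon-m/AYED | Tarea 1/main.py | solve
-- ===== SOURCE A (Python) =====
-- def calculate_matrix_value(x, y, center):
--     return max(abs(x - center), abs(y - center)) + 1
--
-- def solve(size_of_matrix):
--     # 2. Verificar entrada
--     if size_of_matrix == -1:
--         return '-'
--     # 4. Construir matriz de ceros
--     solution_matrix = [[0 for x in range(size_of_matrix)] for y in range(size_of_matrix)]
--     # 5. Encontrar el centro de la matriz
--     center_coord = size_of_matrix // 2
--     # 6. Recorrer la matriz
--     for x in range(size_of_matrix):
--         for y in range(size_of_matrix):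
--             # 6.Encontrar la distancia al centro, sumarle 1 y escribirla en la matriz
--             solution_matrix[x][y] = calculate_matrix_value(x, y, center_coord)
--     # 7. Imprimir la respuesta
--     return solution_matrix
-- ===== SOURCE B (Python) =====
-- def row_of(n, c, x):
--     d = abs(x - c)
--     left = [c - y + 1 for y in range(max(0, c - d))]
--     mid_lo = max(0, c - d)
--     mid_hi = min(n - 1, c + d)
--     mid = [d + 1] * (mid_hi - mid_lo + 1) if mid_lo <= mid_hi else []
--     right = [y - c + 1 for y in range(c + d + 1, n)]
--     return left + mid + right
--
-- def solve(size_of_matrix):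
--     if size_of_matrix == -1:
--         return '-'
--     n = size_of_matrix
--     c = n // 2
--     matrix = []
--     for x in range(n):
--         matrix.append(row_of(n, c, x))
--     return matrix
-- ===== Notes on version B (the rewrite author's own statement) =====
-- stated objective: alternative
-- what changed: Each row is assembled by concatenating three precomputed segments (descending left slope, constant plateau built by list repetition, ascending right slope) instead of evaluating the Chebyshev-distance formula for every cell of a preallocated zero matrix.
-- outside the precondition, e.g. on solve(-1): A returns '-', B returns '-'
import Mathlib
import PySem

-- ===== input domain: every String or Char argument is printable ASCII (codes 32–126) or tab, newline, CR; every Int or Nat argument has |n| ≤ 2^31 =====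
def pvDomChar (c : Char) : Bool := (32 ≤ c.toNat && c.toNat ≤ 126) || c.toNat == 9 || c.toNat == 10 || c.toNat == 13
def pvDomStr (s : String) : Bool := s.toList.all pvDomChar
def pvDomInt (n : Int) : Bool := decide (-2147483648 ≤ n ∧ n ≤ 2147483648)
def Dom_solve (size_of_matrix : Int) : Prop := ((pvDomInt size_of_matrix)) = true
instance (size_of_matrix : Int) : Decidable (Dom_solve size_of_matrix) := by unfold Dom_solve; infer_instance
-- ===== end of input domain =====

-- B builds each row directly as left slope ++ constant plateau ++ right slope instead of
-- computing the Chebyshev distance to the center plus one, cell by cell; an alternative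
-- decomposition of the same O-cost (plateau via list repetition rather than a per-cell formula).
-- (Both Pythons return the string '-' at size_of_matrix == -1; that input is outside Pre_ since
-- a string is not a value of the declared matrix type, so neither Lean port carries that guard.)

-- ===== PORT A =====
def calculateMatrixValue (x y center : Int) : Int :=
  max |x - center| |y - center| + 1

def solve (size_of_matrix : Int) : List (List Int) :=
  let solution_matrix : List (List Int) :=
    (PySem.List.pyRange 0 size_of_matrix 1).map
      (fun _ => (PySem.List.pyRange 0 size_of_matrix 1).map (fun _ => (0 : Int)))
  let center_coord := PySem.Int.floordiv size_of_matrix 2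
  (PySem.List.pyRange 0 size_of_matrix 1).foldl
    (fun m x =>
      (PySem.List.pyRange 0 size_of_matrix 1).foldl
        (fun m y =>
          PySem.List.pySetD m x
            (PySem.List.pySetD (PySem.List.pyGetD m x []) y (calculateMatrixValue x y center_coord)))
        m)
    solution_matrix

-- ===== PORT B =====
-- the body of B's row loop, as a helper (Source B's row_of)
def rowOf (n c x : Int) : List Int :=
  let d := |x - c|
  let left := (PySem.List.pyRange 0 (max 0 (c - d)) 1).map (fun y => c - y + 1)
  let mid_lo := max 0 (c - d)
  let mid_hi := min (n - 1) (c + d)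
  let mid := if mid_lo ≤ mid_hi then PySem.List.pyRepeat [d + 1] (mid_hi - mid_lo + 1) else []
  let right := (PySem.List.pyRange (c + d + 1) n 1).map (fun y => y - c + 1)
  left ++ mid ++ right

def solve_alt (size_of_matrix : Int) : List (List Int) :=
  let n := size_of_matrix
  let c := PySem.Int.floordiv n 2
  (PySem.List.pyRange 0 n 1).foldl (fun matrix x => matrix ++ [rowOf n c x]) []

-- ===== PRECONDITION & SPEC =====
-- Pre_ excludes exactly size_of_matrix = -1, where both Pythons return the string '-',
-- which is not a value of the declared List (List Int) type.
def Pre_solve (size_of_matrix : Int) : Prop := size_of_matrix ≠ -1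
instance (size_of_matrix : Int) : Decidable (Pre_solve size_of_matrix) := by unfold Pre_solve; infer_instance
def pvWitness_solve : Int := 4

def Spec_solve (size_of_matrix : Int) (out : List (List Int)) : Prop := out = solve_alt size_of_matrix
instance (size_of_matrix : Int) (out : List (List Int)) : Decidable (Spec_solve size_of_matrix out) := by unfold Spec_solve; infer_instance

-- ===== CLAIM (what is proved, stated in full; the proofs are below) =====
def Claim_equal_solve : Prop := ∀ (size_of_matrix : Int), Dom_solve size_of_matrix → Pre_solve size_of_matrix → Spec_solve size_of_matrix (solve size_of_matrix)

-- ===== LEMMAS AND PROOFS =====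

-- the per-row specification both ports are reduced to
def specRow (n c x : Int) : List Int :=
  (PySem.List.pyRange 0 n 1).map (fun y => calculateMatrixValue x y c)

def specMatrix (n c : Int) : List (List Int) :=
  (PySem.List.pyRange 0 n 1).map (fun x => specRow n c x)

lemma take_set_succ {α : Type} (l : List α) (i : Nat) (v : α) (h : i < l.length) :
    (l.set i v).take (i + 1) = l.take i ++ [v] := by
  have h1 : (l.take i).length = i := by simp [Nat.le_of_lt h]
  rw [List.set_eq_take_append_cons_drop, if_pos h, List.take_append, List.take_take, h1,
      Nat.min_eq_right (Nat.le_succ i)]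
  simp

-- filling one row of length n by successive assignments yields the mapped row
lemma row_fill (g : Int → Int) (n : Int) : ∀ (k : Nat) (a : Int) (r : List Int),
    0 ≤ a → a ≤ n → (n - a).toNat = k → r.length = n.toNat →
    (PySem.List.pyRange a n 1).foldl (fun r y => PySem.List.pySetD r y (g y)) r
      = r.take a.toNat ++ (PySem.List.pyRange a n 1).map g := by
  intro k
  induction k with
  | zero =>
    intro a r ha han hk hlen
    rw [PySem.List.pyRange_one_eq_nil (show n ≤ a by omega)]
    simp [List.take_of_length_le (show r.length ≤ a.toNat by omega)]
  | succ k ih =>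
    intro a r ha han hk hlen
    have hab : a < n := by omega
    rw [PySem.List.pyRange_one_cons hab]
    simp only [List.foldl_cons, List.map_cons]
    rw [ih (a + 1) (PySem.List.pySetD r a (g a)) (by omega) (by omega) (by omega)
        (by rw [PySem.List.length_pySetD]; exact hlen)]
    rw [PySem.List.pySetD_of_nonneg _ _ ha,
        show (a + 1).toNat = a.toNat + 1 by omega,
        take_set_succ r a.toNat (g a) (by omega)]
    simp

-- the inner y-loop at fixed row index x only rewrites row x
lemma fold_set_row (f : Int → Int) (x : Int) (hx : 0 ≤ x) (ys : List Int) :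
    ∀ (m : List (List Int)), x.toNat < m.length →
    ys.foldl (fun m y => PySem.List.pySetD m x (PySem.List.pySetD (PySem.List.pyGetD m x []) y (f y))) m
      = PySem.List.pySetD m x (ys.foldl (fun r y => PySem.List.pySetD r y (f y)) (PySem.List.pyGetD m x [])) := by
  induction ys with
  | nil =>
    intro m hm
    simp only [List.foldl_nil]
    rw [PySem.List.pyGetD_eq_getElem _ _ hx (by omega), PySem.List.pySetD_of_nonneg _ _ hx,
        List.set_getElem_self]
  | cons y ys ih =>
    intro m hm
    simp only [List.foldl_cons]
    rw [ih _ (by rw [PySem.List.length_pySetD]; exact hm)]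
    rw [PySem.List.pyGetD_eq_getElem _ _ hx (by omega),
        PySem.List.pyGetD_eq_getElem _ _ hx (by simp [PySem.List.length_pySetD]; omega)]
    simp only [PySem.List.pySetD_of_nonneg _ _ hx, List.getElem_set_self, List.set_set]

-- the outer x-loop replaces the zero rows one by one with the mapped rows
lemma outer_fill (n c : Int) : ∀ (k : Nat) (a : Int) (m : List (List Int)),
    0 ≤ a → a ≤ n → (n - a).toNat = k → m.length = n.toNat → (∀ r ∈ m, r.length = n.toNat) →
    (PySem.List.pyRange a n 1).foldl
      (fun m x => (PySem.List.pyRange 0 n 1).foldl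
        (fun m y => PySem.List.pySetD m x (PySem.List.pySetD (PySem.List.pyGetD m x []) y (calculateMatrixValue x y c))) m) m
      = m.take a.toNat ++ (PySem.List.pyRange a n 1).map (fun x => specRow n c x) := by
  intro k
  induction k with
  | zero =>
    intro a m ha han hk hlen hrows
    rw [PySem.List.pyRange_one_eq_nil (show n ≤ a by omega)]
    simp [List.take_of_length_le (show m.length ≤ a.toNat by omega)]
  | succ k ih =>
    intro a m ha han hk hlen hrows
    have hab : a < n := by omega
    have haidx : a.toNat < m.length := by omega
    rw [PySem.List.pyRange_one_cons hab]
    simp only [List.foldl_cons, List.map_cons]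
    rw [fold_set_row (fun y => calculateMatrixValue a y c) a ha _ m haidx]
    have hrowlen : (PySem.List.pyGetD m a []).length = n.toNat := by
      refine hrows _ (PySem.List.pyGetD_mem _ _ ?_)
      constructor <;> omega
    rw [row_fill (fun y => calculateMatrixValue a y c) n n.toNat 0 _ (le_refl 0) (by omega) (by omega) hrowlen]
    simp only [Int.toNat_zero, List.take_zero, List.nil_append]
    rw [PySem.List.pySetD_of_nonneg _ _ ha]
    rw [ih (a + 1) _ (by omega) (by omega) (by omega)
        (by simpa using hlen)
        (by
          intro r hr
          rcases List.mem_or_eq_of_mem_set hr with h | h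
          · exact hrows r h
          · rw [h]; simp [PySem.List.length_pyRange_one])]
    rw [show (a + 1).toNat = a.toNat + 1 by omega,
        take_set_succ m a.toNat _ haidx]
    simp [specRow]

lemma solve_eq_spec (n : Int) : solve n = specMatrix n (PySem.Int.floordiv n 2) := by
  by_cases hn : 0 < n
  · simp only [solve, specMatrix]
    rw [outer_fill n (PySem.Int.floordiv n 2) n.toNat 0 _ (le_refl 0) (by omega) (by omega)
        (by simp [PySem.List.length_pyRange_one])
        (by
          intro r hr
          rcases List.mem_map.mp hr with ⟨x, -, rfl⟩
          simp [PySem.List.length_pyRange_one])]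
    simp
  · have hnil : PySem.List.pyRange 0 n 1 = [] := PySem.List.pyRange_one_eq_nil (by omega)
    simp [solve, specMatrix, hnil]

lemma rowOf_eq_specRow (n c x : Int) (hc : 0 ≤ c ∧ c ≤ n - 1) :
    rowOf n c x = specRow n c x := by
  obtain ⟨hc0, hc1⟩ := hc
  have hd0 : 0 ≤ |x - c| := abs_nonneg _
  simp only [rowOf, specRow]
  set d := |x - c| with hdd
  set m1 := max 0 (c - d) with hm1
  set m2 := min n (c + d + 1) with hm2
  have hsplit : PySem.List.pyRange 0 n 1
      = (PySem.List.pyRange 0 m1 1 ++ PySem.List.pyRange m1 m2 1) ++ PySem.List.pyRange m2 n 1 := by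
    rw [PySem.List.pyRange_one_append 0 m2 n (by omega) (by omega),
        PySem.List.pyRange_one_append 0 m1 m2 (by omega) (by omega)]
  rw [hsplit, List.map_append, List.map_append]
  have hleft : (PySem.List.pyRange 0 m1 1).map (fun y => c - y + 1)
      = (PySem.List.pyRange 0 m1 1).map (fun y => calculateMatrixValue x y c) := by
    apply List.map_congr_left
    intro y hy
    rw [PySem.List.mem_pyRange_one] at hy
    have habs : |y - c| = c - y := by rw [abs_sub_comm]; exact abs_of_nonneg (by omega)
    simp only [calculateMatrixValue, ← hdd, habs]
    rw [max_eq_right (by omega)]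
  have hmidc : m1 ≤ min (n - 1) (c + d) := by omega
  have hmid : (if m1 ≤ min (n - 1) (c + d) then PySem.List.pyRepeat [d + 1] (min (n - 1) (c + d) - m1 + 1) else [])
      = (PySem.List.pyRange m1 m2 1).map (fun y => calculateMatrixValue x y c) := by
    rw [if_pos hmidc, PySem.List.pyRepeat_singleton]
    have hconst : (PySem.List.pyRange m1 m2 1).map (fun y => calculateMatrixValue x y c)
        = (PySem.List.pyRange m1 m2 1).map (fun _ => d + 1) := by
      apply List.map_congr_left
      intro y hy
      rw [PySem.List.mem_pyRange_one] at hy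
      have habs : |y - c| ≤ d := by rw [abs_le]; omega
      simp only [calculateMatrixValue, ← hdd]
      rw [max_eq_left habs]
    rw [hconst, List.map_const', PySem.List.length_pyRange_one]
    congr 1
    omega
  have hright : (PySem.List.pyRange (c + d + 1) n 1).map (fun y => y - c + 1)
      = (PySem.List.pyRange m2 n 1).map (fun y => calculateMatrixValue x y c) := by
    have hrg : PySem.List.pyRange (c + d + 1) n 1 = PySem.List.pyRange m2 n 1 := by
      by_cases h : c + d + 1 ≤ n
      · rw [show m2 = c + d + 1 by omega]
      · rw [PySem.List.pyRange_one_eq_nil (show n ≤ c + d + 1 by omega),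
            PySem.List.pyRange_one_eq_nil (show n ≤ m2 by omega)]
    rw [hrg]
    apply List.map_congr_left
    intro y hy
    rw [PySem.List.mem_pyRange_one] at hy
    have habs : |y - c| = y - c := abs_of_nonneg (by omega)
    simp only [calculateMatrixValue, ← hdd, habs]
    rw [max_eq_right (by omega)]
  rw [hleft, hmid, hright]

lemma solve_alt_eq_spec (n : Int) : solve_alt n = specMatrix n (PySem.Int.floordiv n 2) := by
  simp only [solve_alt, specMatrix]
  rw [PySem.List.foldl_append_singleton_eq_map, List.nil_append]
  apply List.map_congr_left
  intro x hx
  rw [PySem.List.mem_pyRange_one] at hx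
  have h2 : PySem.Int.floordiv n 2 = n / 2 := PySem.Int.floordiv_eq_ediv_of_pos (by norm_num)
  exact rowOf_eq_specRow n _ x (by rw [h2]; omega)

-- ===== VERDICT (by name: the statement is the Claim_ definition above) =====
theorem solve_spec : Claim_equal_solve := by
  intro n _ _
  unfold Spec_solve
  rw [solve_eq_spec, solve_alt_eq_spec]
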